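-- pv_equiv track=rewrite | github.com/anand-vishwakarma-1/C2Rust | src/crust_loader.py | process_c_and_h
-- ===== SOURCE A (Python) =====
-- from typing import List, Dict, Tuple
--
-- def process_c_and_h(c_records: List[Dict]) -> List[Dict]:
--     """
--     Merge headers into their corresponding .c where both exist.
--     Returns a new list of records, with .h merged and renamed to .c.
--     """
--     c_map = {r["file_name"]: r["content"] for r in c_records}
--     out = []
--     visited = set()
--
--     # iterate headers first, attach to .c
--     for rec in sorted(c_records, key=lambda d: d["file_name"], reverse=True):
--         name = rec["file_name"]
--         if name.endswith(".h"):
--             base = name[:-2] + ".c"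
--             if base in c_map:
--                 # merge header+source
--                 merged = (
--                     "// from header\n/*\n"
--                     + rec["content"]
--                     + "\n*/\n"
--                     + c_map[base]
--                 )
--                 out.append({"file_name": base, "content": merged})
--                 visited.add(base)
--             else:
--                 out.append(rec)
--         else:
--             if name not in visited:
--                 out.append(rec)
--
--     # ensure sorted
--     return sorted(out, key=lambda d: d["file_name"])
-- ===== SOURCE B (Python) =====
-- def process_c_and_h(c_records):
--     """
--     Merge headers into their corresponding .c where both exist.
--     Three staged comprehensions (merged headers, lone headers, surviving
--     sources/others) concatenated, then one final sort by file name.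
--     """
--     contents = {r["file_name"]: r["content"] for r in c_records}
--     merged = [
--         {"file_name": r["file_name"][:-2] + ".c",
--          "content": "// from header\n/*\n" + r["content"] + "\n*/\n"
--                     + contents[r["file_name"][:-2] + ".c"]}
--         for r in c_records
--         if r["file_name"].endswith(".h") and r["file_name"][:-2] + ".c" in contents
--     ]
--     lone_headers = [
--         r for r in c_records
--         if r["file_name"].endswith(".h") and r["file_name"][:-2] + ".c" not in contents
--     ]
--     plain = [
--         r for r in c_records
--         if not r["file_name"].endswith(".h")
--         and not (r["file_name"].endswith(".c") and r["file_name"][:-2] + ".h" in contents)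
--     ]
--     return sorted(merged + lone_headers + plain, key=lambda d: d["file_name"])
-- ===== Notes on version B (the rewrite author's own statement) =====
-- stated objective: simpler
-- what changed: Replaces A's reverse-sort pass with a stateful visited-set accumulator by three independent staged comprehensions over the original list (merged headers, lone headers, surviving sources/others) concatenated and sorted once; the contents dict doubles as the header-existence index.
import Mathlib
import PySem

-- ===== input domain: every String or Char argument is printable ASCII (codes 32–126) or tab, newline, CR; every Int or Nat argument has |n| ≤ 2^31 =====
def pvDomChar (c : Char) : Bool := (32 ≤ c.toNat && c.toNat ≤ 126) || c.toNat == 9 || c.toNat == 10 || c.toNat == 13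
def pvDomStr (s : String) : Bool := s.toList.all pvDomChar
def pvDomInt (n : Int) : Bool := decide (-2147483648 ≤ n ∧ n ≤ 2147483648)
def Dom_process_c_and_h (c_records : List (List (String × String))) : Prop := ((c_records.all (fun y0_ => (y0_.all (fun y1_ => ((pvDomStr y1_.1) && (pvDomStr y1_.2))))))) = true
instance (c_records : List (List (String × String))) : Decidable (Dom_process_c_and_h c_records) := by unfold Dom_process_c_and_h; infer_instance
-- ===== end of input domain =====

-- B replaces A's reverse-sort + visited-set accumulator loop by three staged comprehensions
-- (merged headers, lone headers, surviving sources/others) concatenated and sorted once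
-- (objective: simpler).  Equivalence is about return values only.

-- shared record accessors (a record is a Python dict, modelled as its association list)
def pvGet (r : List (String × String)) (k : String) : String :=
  (PySem.Dict.ofList r).getD k ""          -- r[k]; Pre_ guarantees the key is present
def pvName (r : List (String × String)) : String := pvGet r "file_name"
def pvItems (r : List (String × String)) : List (String × String) :=
  (PySem.Dict.ofList r).items              -- the dict value of the record, as appended to out
def pvBuildMap (c_records : List (List (String × String))) : PySem.Dict String String :=
  c_records.foldl (fun d r => d.insert (pvName r) (pvGet r "content")) PySem.Dict.empty
def pvMerged (c_map : PySem.Dict String String) (rec : List (String × String)) (base : String) :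
    List (String × String) :=
  [("file_name", base),
   ("content", "// from header\n/*\n" ++ pvGet rec "content" ++ "\n*/\n" ++ c_map.getD base "")]

-- ===== PORT A =====
def pvStepA (c_map : PySem.Dict String String)
    (st : List (List (String × String)) × PySem.Set String) (rec : List (String × String)) :
    List (List (String × String)) × PySem.Set String :=
  let name := pvName rec
  if PySem.Str.endswith name ".h" then
    let base := PySem.Str.slice name none (some (-2)) ++ ".c"
    if c_map.contains base then
      (st.1 ++ [pvMerged c_map rec base], PySem.Set.add st.2 base)
    else (st.1 ++ [pvItems rec], st.2)
  else
    if PySem.Set.contains st.2 name then st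
    else (st.1 ++ [pvItems rec], st.2)

def process_c_and_h (c_records : List (List (String × String))) : List (List (String × String)) :=
  let c_map := pvBuildMap c_records
  let res := (PySem.List.sorted c_records pvName true).foldl (pvStepA c_map) ([], PySem.Set.empty)
  PySem.List.sorted res.1 pvName false

-- ===== PORT B =====
-- name[:-2] + ".c"  /  name[:-2] + ".h"
def pvBase (n : String) : String := PySem.Str.slice n none (some (-2)) ++ ".c"
def pvHdr (n : String) : String := PySem.Str.slice n none (some (-2)) ++ ".h"
-- the three selection conditions of B's comprehensions, on the file name
def pvPM (contents : PySem.Dict String String) (n : String) : Bool :=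
  PySem.Str.endswith n ".h" && contents.contains (pvBase n)
def pvPL (contents : PySem.Dict String String) (n : String) : Bool :=
  PySem.Str.endswith n ".h" && !contents.contains (pvBase n)
def pvPP (contents : PySem.Dict String String) (n : String) : Bool :=
  !PySem.Str.endswith n ".h"
    && !(PySem.Str.endswith n ".c" && contents.contains (pvHdr n))

def process_c_and_h_alt (c_records : List (List (String × String))) :
    List (List (String × String)) :=
  let contents := pvBuildMap c_records
  let merged := (c_records.filter (fun r => pvPM contents (pvName r))).map
      (fun r => pvMerged contents r (pvBase (pvName r)))
  let lone_headers := (c_records.filter (fun r => pvPL contents (pvName r))).map pvItems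
  let plain := (c_records.filter (fun r => pvPP contents (pvName r))).map pvItems
  PySem.List.sorted (merged ++ lone_headers ++ plain) pvName false

-- ===== PRECONDITION & SPEC =====
-- Pre_ excludes exactly the records missing a "file_name" or "content" key: A raises KeyError there.
def Pre_process_c_and_h (c_records : List (List (String × String))) : Prop :=
  ∀ r ∈ c_records, "file_name" ∈ r.map Prod.fst ∧ "content" ∈ r.map Prod.fst
instance (c_records : List (List (String × String))) : Decidable (Pre_process_c_and_h c_records) := by
  unfold Pre_process_c_and_h; infer_instance

def pvWitness_process_c_and_h : (List (List (String × String))) :=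
  [[("file_name", "a.h"), ("content", "H")],
   [("file_name", "a.c"), ("content", "C")],
   [("file_name", "b.c"), ("content", "B")]]

def Spec_process_c_and_h (c_records : List (List (String × String)))
    (out : List (List (String × String))) : Prop := out = process_c_and_h_alt c_records
instance (c_records : List (List (String × String))) (out : List (List (String × String))) :
    Decidable (Spec_process_c_and_h c_records out) := by unfold Spec_process_c_and_h; infer_instance

-- ===== CLAIM (what is proved, stated in full; the proofs are below) =====
def Claim_equal_process_c_and_h : Prop :=
  ∀ (c_records : List (List (String × String))), Dom_process_c_and_h c_records →
    Pre_process_c_and_h c_records →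
    Spec_process_c_and_h c_records (process_c_and_h c_records)

-- ===== LEMMAS AND PROOFS =====

-- the set of header names, used only by the proofs (A's visited-set reasoning)
def pvHdrSet (c_records : List (List (String × String))) : PySem.Set String :=
  PySem.Set.ofList
    ((c_records.filter (fun r => PySem.Str.endswith (pvName r) ".h")).map pvName)

-- the per-record decision both programs implement: `none` = the record is dropped
def pvEmit (c_map : PySem.Dict String String) (headers : PySem.Set String)
    (rec : List (String × String)) : Option (List (String × String)) :=
  let name := pvName rec
  if PySem.Str.endswith name ".h" then
    if c_map.contains (PySem.Str.slice name none (some (-2)) ++ ".c") then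
      some (pvMerged c_map rec (PySem.Str.slice name none (some (-2)) ++ ".c"))
    else some (pvItems rec)
  else if PySem.Str.endswith name ".c"
          && PySem.Set.contains headers (PySem.Str.slice name none (some (-2)) ++ ".h") then
    none
  else some (pvItems rec)

-- B's three comprehension stages, as per-record emitters (proof bookkeeping)
def pvEM (cm : PySem.Dict String String) (r : List (String × String)) :
    Option (List (String × String)) :=
  if pvPM cm (pvName r) then some (pvMerged cm r (pvBase (pvName r))) else none
def pvEL (cm : PySem.Dict String String) (r : List (String × String)) :
    Option (List (String × String)) :=
  if pvPL cm (pvName r) then some (pvItems r) else none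
def pvEP (cm : PySem.Dict String String) (r : List (String × String)) :
    Option (List (String × String)) :=
  if pvPP cm (pvName r) then some (pvItems r) else none

-- skip-condition of A for a non-header name n, phrased on the input
def pvV (c_map : PySem.Dict String String) (headers : PySem.Set String) (n : String) : Prop :=
  PySem.Str.endswith n ".c" = true
  ∧ PySem.Set.contains headers (PySem.Str.slice n none (some (-2)) ++ ".h") = true
  ∧ c_map.contains n = true

-- string facts
lemma pv_slice_append_two (u : List Char) (c1 c2 : Char) :
    PySem.List.slice (u ++ [c1, c2]) none (some (-2)) = u := by
  simp [PySem.List.slice]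

lemma pv_endswith_elim (s t : String) (c1 c2 : Char) (ht : t.toList = [c1, c2])
    (h : PySem.Str.endswith s t = true) :
    ∃ u : List Char, s.toList = u ++ [c1, c2] ∧ (PySem.Str.slice s none (some (-2))).toList = u := by
  rw [PySem.Str.endswith_eq, PySem.Chars.endswith_iff, ht] at h
  obtain ⟨u, hu⟩ := h
  refine ⟨u, hu.symm, ?_⟩
  rw [PySem.Str.toList_slice, PySem.Chars.slice_eq_listSlice, ← hu, pv_slice_append_two]

lemma pv_endswith_append_two (u : List Char) (s t : String) (hs : s.toList = u ++ t.toList) :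
    PySem.Str.endswith s t = true := by
  rw [PySem.Str.endswith_eq, PySem.Chars.endswith_iff, hs]
  exact List.suffix_append u t.toList

lemma pv_lt_ch (u : List Char) (s t : String) (hs : s.toList = u ++ ['.', 'c'])
    (ht : t.toList = u ++ ['.', 'h']) : s < t := by
  rw [String.lt_iff_toList_lt, hs, ht]
  show List.Lex (· < ·) _ _
  exact List.Lex.append_left _ (List.Lex.cons (List.Lex.rel (by decide))) u

-- key computations on emitted records
lemma pv_name_merged (c_map : PySem.Dict String String) (rec : List (String × String)) (b : String) :
    pvName (pvMerged c_map rec b) = b := by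
  simp [pvName, pvGet, pvMerged, PySem.Dict.ofList, PySem.Dict.getD, PySem.Dict.update,
        PySem.Dict.get?_insert_self, PySem.Dict.get?_insert_of_ne]

lemma pv_ofList_items (d : PySem.Dict String String) (h : d.keys.Nodup) :
    PySem.Dict.ofList d.items = d := by
  apply PySem.Dict.ext
  have h2 := PySem.Dict.items_foldl_insert_fresh (l := d.items) (k := Prod.fst) (v := Prod.snd)
      (d := PySem.Dict.empty) (fun a _ => by simp) h
  simpa [PySem.Dict.ofList, PySem.Dict.update, PySem.Dict.empty] using h2

lemma pv_name_items (r : List (String × String)) : pvName (pvItems r) = pvName r := by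
  unfold pvName pvGet pvItems
  rw [pv_ofList_items _ (PySem.Dict.nodup_keys_ofList r)]

-- membership facts about the two indices
lemma pv_contains_buildMap (c_records : List (List (String × String))) (n : String) :
    (pvBuildMap c_records).contains n = true ↔ n ∈ c_records.map pvName := by
  rw [PySem.Dict.contains_iff_mem_keys, pvBuildMap,
      PySem.Dict.keys_foldl_insert_key c_records pvName (fun _ r => pvGet r "content")
        PySem.Dict.empty]
  simp [PySem.Dict.keys_empty, PySem.Set.mem_update]

lemma pv_mem_headers (c_records : List (List (String × String))) (n : String) :
    n ∈ PySem.Set.ofList ((c_records.filter (fun r => PySem.Str.endswith (pvName r) ".h")).map pvName)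
    ↔ ∃ r ∈ c_records, PySem.Str.endswith (pvName r) ".h" = true ∧ pvName r = n := by
  rw [PySem.Set.mem_ofList]
  simp [List.mem_filter]
  tauto

-- a name ending ".h" is in the contents map iff it is in the header-name set
lemma pv_contains_h_eq (c_records : List (List (String × String))) (x : String) :
    (pvBuildMap c_records).contains (x ++ ".h")
      = PySem.Set.contains (pvHdrSet c_records) (x ++ ".h") := by
  have hends : PySem.Str.endswith (x ++ ".h") ".h" = true :=
    pv_endswith_append_two x.toList _ ".h" (by rw [String.toList_append])
  rw [Bool.eq_iff_iff, pv_contains_buildMap, pvHdrSet, PySem.Set.contains_iff, pv_mem_headers]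
  constructor
  · intro hmem
    obtain ⟨r, hr, hrn⟩ := List.mem_map.mp hmem
    exact ⟨r, hr, by rw [hrn]; exact hends, hrn⟩
  · rintro ⟨r, hr, _, hrn⟩
    exact hrn ▸ List.mem_map_of_mem hr

-- B's loop is a filterMap
lemma pv_filter_map_eq_filterMap {α β : Type} (p : α → Bool) (f : α → β) (l : List α) :
    (l.filter p).map f = l.filterMap (fun x => if p x then some (f x) else none) := by
  induction l with
  | nil => rfl
  | cons x xs ih => by_cases h : p x = true <;> simp [h, ih]

-- pvEmit, written as B's three-way branch on the name (contents vs header-set reconciled)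
lemma pv_emit_eq_branches (c_records : List (List (String × String)))
    (r : List (String × String)) :
    pvEmit (pvBuildMap c_records) (pvHdrSet c_records) r =
      if pvPM (pvBuildMap c_records) (pvName r) then
        some (pvMerged (pvBuildMap c_records) r (pvBase (pvName r)))
      else if pvPL (pvBuildMap c_records) (pvName r) then some (pvItems r)
      else if pvPP (pvBuildMap c_records) (pvName r) then some (pvItems r)
      else none := by
  have hch := pv_contains_h_eq c_records (PySem.Str.slice (pvName r) none (some (-2)))
  unfold pvEmit pvPM pvPL pvPP pvBase pvHdr
  simp only []
  split_ifs <;> simp_all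

-- ===== A's loop =====
set_option maxHeartbeats 1000000 in
lemma pv_loopA (c_map : PySem.Dict String String) (headers : PySem.Set String)
    (ys : List (List (String × String))) (vis : PySem.Set String)
    (o : List (List (String × String)))
    (hord : ys.Pairwise (fun a b => pvName b ≤ pvName a))
    (hcmap : ∀ r ∈ ys, c_map.contains (pvName r) = true)
    (hhdr : ∀ r ∈ ys, PySem.Str.endswith (pvName r) ".h" = true →
        PySem.Set.contains headers (pvName r) = true)
    (hvis1 : ∀ n : String, PySem.Set.contains vis n = true → pvV c_map headers n)
    (hvis2 : ∀ n : String, pvV c_map headers n →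
        (PySem.Str.slice n none (some (-2)) ++ ".h") ∉ ys.map pvName →
        PySem.Set.contains vis n = true) :
    (ys.foldl (pvStepA c_map) (o, vis)).1 = o ++ ys.filterMap (pvEmit c_map headers) := by
  induction ys generalizing vis o with
  | nil => simp
  | cons rec tail ih =>
    obtain ⟨hord1, hordt⟩ := List.pairwise_cons.mp hord
    have hcmapt : ∀ r ∈ tail, c_map.contains (pvName r) = true :=
      fun r hr => hcmap r (List.mem_cons_of_mem _ hr)
    have hhdrt : ∀ r ∈ tail, PySem.Str.endswith (pvName r) ".h" = true →
        PySem.Set.contains headers (pvName r) = true :=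
      fun r hr => hhdr r (List.mem_cons_of_mem _ hr)
    have hmemsplit : ∀ x : String, x ∈ (rec :: tail).map pvName ↔
        x = pvName rec ∨ x ∈ tail.map pvName := by
      intro x; simp [List.mem_cons, eq_comm]
    by_cases hH : PySem.Str.endswith (pvName rec) ".h" = true
    · -- header record
      obtain ⟨u, hmu, hsu⟩ := pv_endswith_elim (pvName rec) ".h" '.' 'h' (by decide) hH
      have hbase : (PySem.Str.slice (pvName rec) none (some (-2)) ++ ".c").toList
          = u ++ ['.', 'c'] := by
        rw [String.toList_append, hsu, show (".c").toList = ['.', 'c'] from by decide]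
      set base := PySem.Str.slice (pvName rec) none (some (-2)) ++ ".c" with hbdef
      have hsliceb : (PySem.Str.slice base none (some (-2))).toList = u := by
        rw [PySem.Str.toList_slice, PySem.Chars.slice_eq_listSlice, hbase, pv_slice_append_two]
      have hbh : PySem.Str.slice base none (some (-2)) ++ ".h" = pvName rec := by
        rw [← String.toList_inj, String.toList_append, hsliceb, hmu,
          show (".h").toList = ['.', 'h'] from by decide]
      -- base determines the header name
      have hdet : ∀ n : String, pvV c_map headers n →
          PySem.Str.slice n none (some (-2)) ++ ".h" = pvName rec → n = base := by
        intro n hV hn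
        obtain ⟨w, hnw, hsw⟩ := pv_endswith_elim n ".c" '.' 'c' (by decide) hV.1
        have h1 : w ++ ['.', 'h'] = u ++ ['.', 'h'] := by
          have h2 := congrArg String.toList hn
          rw [String.toList_append, hsw, hmu,
            show (".h").toList = ['.', 'h'] from by decide] at h2
          exact h2
        have hw : w = u := by
          have := List.append_inj_left' h1 rfl
          simpa using this
        rw [← String.toList_inj, hbase, hnw, hw]
      by_cases hC : c_map.contains base = true
      · -- merged: base is recorded as visited
        have hstep : pvStepA c_map (o, vis) rec
            = (o ++ [pvMerged c_map rec base], PySem.Set.add vis base) := by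
          unfold pvStepA
          simp only [← hbdef]
          split_ifs <;> simp_all
        have hemit : pvEmit c_map headers rec = some (pvMerged c_map rec base) := by
          unfold pvEmit
          simp only [← hbdef]
          split_ifs <;> simp_all
        have hvist1 : ∀ n : String, PySem.Set.contains (PySem.Set.add vis base) n = true →
            pvV c_map headers n := by
          intro n hc
          rcases PySem.Set.mem_add vis base n |>.mp ((PySem.Set.contains_iff _ _).mp hc) with hn | rfl
          · exact hvis1 n ((PySem.Set.contains_iff _ _).mpr hn)
          · refine ⟨?_, ?_, hC⟩
            · exact pv_endswith_append_two u base ".c"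
                (by rw [hbase, show (".c").toList = ['.', 'c'] from by decide])
            · rw [hbh]; exact hhdr rec List.mem_cons_self hH
        have hvist2 : ∀ n : String, pvV c_map headers n →
            (PySem.Str.slice n none (some (-2)) ++ ".h") ∉ tail.map pvName →
            PySem.Set.contains (PySem.Set.add vis base) n = true := by
          intro n hV hmem
          rw [PySem.Set.contains_iff, PySem.Set.mem_add]
          by_cases hin : (PySem.Str.slice n none (some (-2)) ++ ".h") ∈ (rec :: tail).map pvName
          · rcases (hmemsplit _).mp hin with heq | hin2
            · right; exact hdet n hV heq
            · exact absurd hin2 hmem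
          · left
            rw [← PySem.Set.contains_iff]
            exact hvis2 n hV hin
        rw [List.foldl_cons, hstep, List.filterMap_cons, hemit,
          ih _ _ hordt hcmapt hhdrt hvist1 hvist2]
        simp
      · -- header without a source: emitted as itself, visited unchanged
        have hstep : pvStepA c_map (o, vis) rec = (o ++ [pvItems rec], vis) := by
          unfold pvStepA
          simp only [← hbdef]
          split_ifs <;> simp_all
        have hemit : pvEmit c_map headers rec = some (pvItems rec) := by
          unfold pvEmit
          simp only [← hbdef]
          split_ifs <;> simp_all
        have hvist2 : ∀ n : String, pvV c_map headers n →
            (PySem.Str.slice n none (some (-2)) ++ ".h") ∉ tail.map pvName →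
            PySem.Set.contains vis n = true := by
          intro n hV hmem
          by_cases hin : (PySem.Str.slice n none (some (-2)) ++ ".h") ∈ (rec :: tail).map pvName
          · rcases (hmemsplit _).mp hin with heq | hin2
            · exact absurd (hdet n hV heq ▸ hV.2.2) hC
            · exact absurd hin2 hmem
          · exact hvis2 n hV hin
        rw [List.foldl_cons, hstep, List.filterMap_cons, hemit,
          ih _ _ hordt hcmapt hhdrt hvis1 hvist2]
        simp
    · -- non-header record
      -- a name with pvV cannot point at rec as its header
      have hnotrec : ∀ n : String, pvV c_map headers n →
          PySem.Str.slice n none (some (-2)) ++ ".h" ≠ pvName rec := by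
        intro n hV heq
        obtain ⟨w, hnw, hsw⟩ := pv_endswith_elim n ".c" '.' 'c' (by decide) hV.1
        apply hH
        refine pv_endswith_append_two w (pvName rec) ".h" ?_
        have h2 := congrArg String.toList heq
        rw [String.toList_append, hsw] at h2
        exact h2.symm
      have hskip : PySem.Set.contains vis (pvName rec)
          = (PySem.Str.endswith (pvName rec) ".c"
             && PySem.Set.contains headers
                  (PySem.Str.slice (pvName rec) none (some (-2)) ++ ".h")) := by
        by_cases hsk : (PySem.Str.endswith (pvName rec) ".c"
            && PySem.Set.contains headers
                 (PySem.Str.slice (pvName rec) none (some (-2)) ++ ".h")) = true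
        · rw [hsk]
          obtain ⟨hc, hhd⟩ := Bool.and_eq_true_iff.mp hsk
          obtain ⟨w, hnw, hsw⟩ := pv_endswith_elim (pvName rec) ".c" '.' 'c' (by decide) hc
          have hhn : (PySem.Str.slice (pvName rec) none (some (-2)) ++ ".h").toList
              = w ++ ['.', 'h'] := by
            rw [String.toList_append, hsw, show (".h").toList = ['.', 'h'] from by decide]
          have hV : pvV c_map headers (pvName rec) :=
            ⟨hc, hhd, hcmap rec List.mem_cons_self⟩
          refine hvis2 _ hV fun hmem => ?_
          rcases (hmemsplit _).mp hmem with heq | hin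
          · exact hnotrec _ hV heq
          · obtain ⟨r', hr', hrn⟩ := List.mem_map.mp hin
            have hle : pvName r' ≤ pvName rec := hord1 r' hr'
            have hlt : pvName rec < pvName r' := by
              rw [hrn]
              exact pv_lt_ch w _ _ hnw hhn
            exact absurd hle (not_le.mpr hlt)
        · rw [(Bool.not_eq_true _).mp hsk]
          by_contra hvv
          have hvt : PySem.Set.contains vis (pvName rec) = true := by
            simpa using hvv
          obtain ⟨h1, h2, _⟩ := hvis1 _ hvt
          exact hsk (by rw [h1, h2]; rfl)
      have hvist2 : ∀ n : String, pvV c_map headers n →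
          (PySem.Str.slice n none (some (-2)) ++ ".h") ∉ tail.map pvName →
          PySem.Set.contains vis n = true := by
        intro n hV hmem
        by_cases hin : (PySem.Str.slice n none (some (-2)) ++ ".h") ∈ (rec :: tail).map pvName
        · rcases (hmemsplit _).mp hin with heq | hin2
          · exact absurd heq (hnotrec n hV)
          · exact absurd hin2 hmem
        · exact hvis2 n hV hin
      by_cases hsk : (PySem.Str.endswith (pvName rec) ".c"
          && PySem.Set.contains headers
               (PySem.Str.slice (pvName rec) none (some (-2)) ++ ".h")) = true
      · have hstep : pvStepA c_map (o, vis) rec = (o, vis) := by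
          unfold pvStepA
          simp only []
          split_ifs <;> simp_all
        have hemit : pvEmit c_map headers rec = none := by
          unfold pvEmit
          simp only []
          split_ifs <;> simp_all
        rw [List.foldl_cons, hstep, List.filterMap_cons, hemit,
          ih _ _ hordt hcmapt hhdrt hvis1 hvist2]
      · have hstep : pvStepA c_map (o, vis) rec = (o ++ [pvItems rec], vis) := by
          unfold pvStepA
          simp only []
          split_ifs <;> simp_all
        have hemit : pvEmit c_map headers rec = some (pvItems rec) := by
          unfold pvEmit
          simp only []
          split_ifs <;> simp_all
        rw [List.foldl_cons, hstep, List.filterMap_cons, hemit,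
          ih _ _ hordt hcmapt hhdrt hvis1 hvist2]
        simp

-- a string cannot end in both ".c" and ".h"
lemma pv_last_two_ne {x y : List Char} (h : x ++ ['.', 'c'] = y ++ ['.', 'h']) : False := by
  have h1 : ((x ++ ['.']) ++ ['c']).getLast? = ((y ++ ['.']) ++ ['h']).getLast? := by
    simpa using congrArg List.getLast? h
  simp at h1

-- the three ways pvEmit returns a record
lemma pv_emit_cases (cm : PySem.Dict String String) (hd : PySem.Set String)
    (r x : List (String × String)) (h : pvEmit cm hd r = some x) :
    (PySem.Str.endswith (pvName r) ".h" = true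
      ∧ cm.contains (PySem.Str.slice (pvName r) none (some (-2)) ++ ".c") = true
      ∧ x = pvMerged cm r (PySem.Str.slice (pvName r) none (some (-2)) ++ ".c"))
    ∨ (PySem.Str.endswith (pvName r) ".h" = true
      ∧ cm.contains (PySem.Str.slice (pvName r) none (some (-2)) ++ ".c") = false
      ∧ x = pvItems r)
    ∨ (PySem.Str.endswith (pvName r) ".h" = false
      ∧ (PySem.Str.endswith (pvName r) ".c"
         && PySem.Set.contains hd (PySem.Str.slice (pvName r) none (some (-2)) ++ ".h")) = false
      ∧ x = pvItems r) := by
  unfold pvEmit at h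
  simp only [] at h
  split_ifs at h with h1 h2 h3 <;> simp_all

-- records emitted with the same output name carry the same input name
lemma pv_emit_keyeq (c_records : List (List (String × String)))
    (a b r1 r2 : List (String × String)) (h1 : r1 ∈ c_records) (h2 : r2 ∈ c_records)
    (e1 : pvEmit (pvBuildMap c_records) (pvHdrSet c_records) r1 = some a)
    (e2 : pvEmit (pvBuildMap c_records) (pvHdrSet c_records) r2 = some b)
    (hk : pvName a = pvName b) : pvName r1 = pvName r2 := by
  set cm := pvBuildMap c_records with hcm
  set hd := pvHdrSet c_records with hhd
  have hdr_mem : ∀ r ∈ c_records, PySem.Str.endswith (pvName r) ".h" = true →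
      PySem.Set.contains hd (pvName r) = true := by
    intro r hr hh
    rw [PySem.Set.contains_iff, hhd, pvHdrSet, pv_mem_headers]
    exact ⟨r, hr, hh, rfl⟩
  rcases pv_emit_cases cm hd r1 a e1 with ⟨hH1, hC1, ha⟩ | ⟨hH1, hC1n, ha⟩ | ⟨hH1f, hS1, ha⟩ <;>
    rcases pv_emit_cases cm hd r2 b e2 with ⟨hH2, hC2, hb⟩ | ⟨hH2, hC2n, hb⟩ | ⟨hH2f, hS2, hb⟩
  all_goals (
    first
    | -- both non-merged: the output names are the input names
      (subst ha hb
       rw [pv_name_items, pv_name_items] at hk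
       exact hk)
    | skip)
  -- remaining: at least one merged
  · -- both merged
    subst ha hb
    rw [pv_name_merged, pv_name_merged] at hk
    obtain ⟨u1, hm1, hs1⟩ := pv_endswith_elim (pvName r1) ".h" '.' 'h' (by decide) hH1
    obtain ⟨u2, hm2, hs2⟩ := pv_endswith_elim (pvName r2) ".h" '.' 'h' (by decide) hH2
    have h12 : u1 = u2 := by
      have := congrArg String.toList hk
      rw [String.toList_append, String.toList_append, hs1, hs2] at this
      have := List.append_inj_left' this rfl
      exact this
    rw [← String.toList_inj, hm1, hm2, h12]
  · -- r1 merged, r2 a header without a source: names end in ".c" and ".h" at once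
    exfalso
    subst ha hb
    rw [pv_name_merged, pv_name_items] at hk
    obtain ⟨u1, hm1, hs1⟩ := pv_endswith_elim (pvName r1) ".h" '.' 'h' (by decide) hH1
    obtain ⟨u2, hm2, hs2⟩ := pv_endswith_elim (pvName r2) ".h" '.' 'h' (by decide) hH2
    have := congrArg String.toList hk
    rw [String.toList_append, hs1, hm2,
      show (".c").toList = ['.', 'c'] from by decide] at this
    exact pv_last_two_ne this
  · -- r1 merged, r2 plain: r2 would have been skipped
    exfalso
    subst ha hb
    rw [pv_name_merged, pv_name_items] at hk
    obtain ⟨u1, hm1, hs1⟩ := pv_endswith_elim (pvName r1) ".h" '.' 'h' (by decide) hH1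
    have hn2 : (pvName r2).toList = u1 ++ ['.', 'c'] := by
      rw [← hk, String.toList_append, hs1,
        show (".c").toList = ['.', 'c'] from by decide]
    have hends : PySem.Str.endswith (pvName r2) ".c" = true :=
      pv_endswith_append_two u1 (pvName r2) ".c"
        (by rw [hn2, show (".c").toList = ['.', 'c'] from by decide])
    have hsl : (PySem.Str.slice (pvName r2) none (some (-2))).toList = u1 := by
      rw [PySem.Str.toList_slice, PySem.Chars.slice_eq_listSlice, hn2, pv_slice_append_two]
    have hname : PySem.Str.slice (pvName r2) none (some (-2)) ++ ".h" = pvName r1 := by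
      rw [← String.toList_inj, String.toList_append, hsl, hm1,
        show (".h").toList = ['.', 'h'] from by decide]
    have : PySem.Set.contains hd (PySem.Str.slice (pvName r2) none (some (-2)) ++ ".h") = true := by
      rw [hname]; exact hdr_mem r1 h1 hH1
    rw [hends, this] at hS2
    simp at hS2
  · -- r2 merged, r1 a header without a source (symmetric)
    exfalso
    subst ha hb
    rw [pv_name_items, pv_name_merged] at hk
    obtain ⟨u1, hm1, hs1⟩ := pv_endswith_elim (pvName r1) ".h" '.' 'h' (by decide) hH1
    obtain ⟨u2, hm2, hs2⟩ := pv_endswith_elim (pvName r2) ".h" '.' 'h' (by decide) hH2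
    have := congrArg String.toList hk.symm
    rw [String.toList_append, hs2, hm1,
      show (".c").toList = ['.', 'c'] from by decide] at this
    exact pv_last_two_ne this
  · -- r2 merged, r1 plain (symmetric)
    exfalso
    subst ha hb
    rw [pv_name_items, pv_name_merged] at hk
    obtain ⟨u2, hm2, hs2⟩ := pv_endswith_elim (pvName r2) ".h" '.' 'h' (by decide) hH2
    have hn1 : (pvName r1).toList = u2 ++ ['.', 'c'] := by
      rw [hk, String.toList_append, hs2,
        show (".c").toList = ['.', 'c'] from by decide]
    have hends : PySem.Str.endswith (pvName r1) ".c" = true :=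
      pv_endswith_append_two u2 (pvName r1) ".c"
        (by rw [hn1, show (".c").toList = ['.', 'c'] from by decide])
    have hsl : (PySem.Str.slice (pvName r1) none (some (-2))).toList = u2 := by
      rw [PySem.Str.toList_slice, PySem.Chars.slice_eq_listSlice, hn1, pv_slice_append_two]
    have hname : PySem.Str.slice (pvName r1) none (some (-2)) ++ ".h" = pvName r2 := by
      rw [← String.toList_inj, String.toList_append, hsl, hm2,
        show (".h").toList = ['.', 'h'] from by decide]
    have : PySem.Set.contains hd (PySem.Str.slice (pvName r1) none (some (-2)) ++ ".h") = true := by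
      rw [hname]; exact hdr_mem r2 h2 hH2
    rw [hends, this] at hS1
    simp at hS1

-- a stable insertion leaves the subsequence of any other key class unchanged
lemma pv_filter_insertBy_notp {α : Type} (before : α → α → Bool) (p : α → Bool) (x : α)
    (ys : List α) (hpx : p x = false) :
    (PySem.List.insertBy before x ys).filter p = ys.filter p := by
  induction ys with
  | nil => simp [PySem.List.insertBy, hpx]
  | cons y ys ih =>
    by_cases hb : before x y = true
    · simp [PySem.List.insertBy, hb, hpx]
    · simp only [PySem.List.insertBy, Bool.not_eq_true] at *
      rw [hb]
      simp only [List.filter_cons]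
      cases hpy : p y <;> simp [hpy, ih]

-- a stable insertion of a key-class member appends it to the class subsequence (ascending)
lemma pv_filter_insertBy_asc {α κ : Type} [LinearOrder κ] (key : α → κ) (p : α → Bool) (k : κ)
    (x : α) (ys : List α) (hsort : ys.Pairwise (fun a b => key a ≤ key b))
    (hpx : p x = true) (hkx : key x = k) (hp : ∀ y ∈ ys, p y = true → key y = k) :
    (PySem.List.insertBy (fun a b => decide (key a < key b)) x ys).filter p
      = ys.filter p ++ [x] := by
  induction ys with
  | nil => simp [PySem.List.insertBy, hpx]
  | cons y ys ih =>
    obtain ⟨hy1, hys⟩ := List.pairwise_cons.mp hsort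
    by_cases hb : key x < key y
    · have hnil : (y :: ys).filter p = [] := by
        rw [List.filter_eq_nil_iff]
        intro z hz hpz
        have hkz : key z = k := hp z hz hpz
        have : key y ≤ key z := by
          rcases hz with _ | hz
          · exact le_refl _
          · exact hy1 z (by assumption)
        exact absurd (lt_of_lt_of_le (hkx ▸ hb) this) (by simp [hkz])
      simp only [PySem.List.insertBy, decide_eq_true_eq, if_pos hb]
      rw [List.filter_cons_of_pos hpx, hnil]
      simp
    · simp only [PySem.List.insertBy, decide_eq_true_eq, if_neg hb]
      rw [List.filter_cons, ih hys (fun z hz => hp z (List.mem_cons_of_mem _ hz))]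
      cases hpy : p y <;> simp [hpy]

-- the same, for a descending accumulator (reverse=True)
lemma pv_filter_insertBy_desc {α κ : Type} [LinearOrder κ] (key : α → κ) (p : α → Bool) (k : κ)
    (x : α) (ys : List α) (hsort : ys.Pairwise (fun a b => key b ≤ key a))
    (hpx : p x = true) (hkx : key x = k) (hp : ∀ y ∈ ys, p y = true → key y = k) :
    (PySem.List.insertBy (fun a b => decide (key b < key a)) x ys).filter p
      = ys.filter p ++ [x] := by
  induction ys with
  | nil => simp [PySem.List.insertBy, hpx]
  | cons y ys ih =>
    obtain ⟨hy1, hys⟩ := List.pairwise_cons.mp hsort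
    by_cases hb : key y < key x
    · have hnil : (y :: ys).filter p = [] := by
        rw [List.filter_eq_nil_iff]
        intro z hz hpz
        have hkz : key z = k := hp z hz hpz
        have : key z ≤ key y := by
          rcases hz with _ | hz
          · exact le_refl _
          · exact hy1 z (by assumption)
        exact absurd (lt_of_le_of_lt this (hkx ▸ hb)) (by simp [hkz])
      simp only [PySem.List.insertBy, decide_eq_true_eq, if_pos hb]
      rw [List.filter_cons_of_pos hpx, hnil]
      simp
    · simp only [PySem.List.insertBy, decide_eq_true_eq, if_neg hb]
      rw [List.filter_cons, ih hys (fun z hz => hp z (List.mem_cons_of_mem _ hz))]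
      cases hpy : p y <;> simp [hpy]

-- STABILITY: sorting does not reorder a predicate that selects a single key class
lemma pv_sorted_filter_class {α κ : Type} [LinearOrder κ] (key : α → κ) (p : α → Bool) (k : κ)
    (l : List α) (hp : ∀ x ∈ l, p x = true → key x = k) :
    (PySem.List.sorted l key).filter p = l.filter p := by
  induction l using List.reverseRecOn with
  | nil => simp [PySem.List.sorted_eq_foldl_insertBy]
  | append_singleton l x ih =>
    have hsnoc : PySem.List.sorted (l ++ [x]) key
        = PySem.List.insertBy (fun a b => decide (key a < key b)) x (PySem.List.sorted l key) := by
      rw [PySem.List.sorted_eq_foldl_insertBy, PySem.List.sorted_eq_foldl_insertBy,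
        List.foldl_append]
      rfl
    have hpl : ∀ y ∈ l, p y = true → key y = k := fun y hy => hp y (List.mem_append_left _ hy)
    have hps : ∀ y ∈ PySem.List.sorted l key, p y = true → key y = k := by
      intro y hy
      exact hpl y ((PySem.List.mem_sorted _ _ _ _).mp hy)
    rw [hsnoc]
    cases hpx : p x
    · rw [pv_filter_insertBy_notp _ _ _ _ hpx, ih hpl, List.filter_append]
      simp [hpx]
    · rw [pv_filter_insertBy_asc key p k x _ (PySem.List.sorted_pairwise l key) hpx
        (hp x (List.mem_append_right _ List.mem_cons_self) hpx) hps, ih hpl, List.filter_append]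
      simp [hpx]

lemma pv_sorted_filter_class_rev {α κ : Type} [LinearOrder κ] (key : α → κ) (p : α → Bool) (k : κ)
    (l : List α) (hp : ∀ x ∈ l, p x = true → key x = k) :
    (PySem.List.sorted l key true).filter p = l.filter p := by
  induction l using List.reverseRecOn with
  | nil => simp [PySem.List.sorted_rev_eq_foldl_insertBy]
  | append_singleton l x ih =>
    have hsnoc : PySem.List.sorted (l ++ [x]) key true
        = PySem.List.insertBy (fun a b => decide (key b < key a)) x
            (PySem.List.sorted l key true) := by
      rw [PySem.List.sorted_rev_eq_foldl_insertBy, PySem.List.sorted_rev_eq_foldl_insertBy,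
        List.foldl_append]
      rfl
    have hpl : ∀ y ∈ l, p y = true → key y = k := fun y hy => hp y (List.mem_append_left _ hy)
    have hps : ∀ y ∈ PySem.List.sorted l key true, p y = true → key y = k := by
      intro y hy
      exact hpl y ((PySem.List.mem_sorted _ _ _ _).mp hy)
    rw [hsnoc]
    cases hpx : p x
    · rw [pv_filter_insertBy_notp _ _ _ _ hpx, ih hpl, List.filter_append]
      simp [hpx]
    · rw [pv_filter_insertBy_desc key p k x _ (PySem.List.sorted_pairwise_rev l key) hpx
        (hp x (List.mem_append_right _ List.mem_cons_self) hpx) hps, ih hpl, List.filter_append]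
      simp [hpx]

-- filtering the output of a filterMap is filterMapping a filtered input
lemma pv_filter_filterMap {α β : Type} (E : α → Option β) (q : β → Bool) (l : List α) :
    (l.filterMap E).filter q
      = (l.filter (fun r => ((E r).map q).getD false)).filterMap E := by
  induction l with
  | nil => simp
  | cons x xs ih =>
    cases hE : E x with
    | none => simp [hE, ih]
    | some b => cases hq : q b <;> simp [hE, hq, ih]

-- two filterMaps agreeing wherever the class predicate hits produce the same class
lemma pv_filterMap_filter_congr {α β : Type} (E E' : α → Option β) (q : β → Bool) (l : List α)
    (h1 : ∀ r ∈ l, ∀ b, E' r = some b → E r = some b)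
    (h2 : ∀ r ∈ l, ∀ b, E r = some b → q b = true → E' r = some b) :
    (l.filterMap E').filter q = (l.filterMap E).filter q := by
  induction l with
  | nil => rfl
  | cons x xs ih =>
    have iht := ih (fun r hr => h1 r (List.mem_cons_of_mem _ hr))
      (fun r hr => h2 r (List.mem_cons_of_mem _ hr))
    cases hE' : E' x with
    | some b =>
      have hE : E x = some b := h1 x List.mem_cons_self b hE'
      simp [hE', hE, List.filter_cons, iht]
    | none =>
      cases hE : E x with
      | none => simp [hE', hE, iht]
      | some b =>
        have hq : q b = false := by
          by_contra hq
          have := h2 x List.mem_cons_self b hE (by simpa using hq)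
          simp [hE'] at this
        simp [hE', hE, hq, iht]

-- a class with no hits in a filterMap is empty
lemma pv_filter_filterMap_nil {α β : Type} (E : α → Option β) (q : β → Bool) (l : List α)
    (h : ∀ r ∈ l, ∀ b, E r = some b → q b = false) :
    (l.filterMap E).filter q = [] := by
  rw [List.filter_eq_nil_iff]
  intro b hb hq
  obtain ⟨r, hr, hE⟩ := List.mem_filterMap.mp hb
  rw [h r hr b hE] at hq
  exact Bool.noConfusion hq

-- a three-way exclusive split of a filterMap is a permutation of it
lemma pv_perm_split {α β : Type} (E E1 E2 E3 : α → Option β) (l : List α)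
    (hsplit : ∀ r ∈ l, E r = ((E1 r).orElse fun _ => ((E2 r).orElse fun _ => E3 r)))
    (hd12 : ∀ r ∈ l, E1 r = none ∨ E2 r = none)
    (hd13 : ∀ r ∈ l, E1 r = none ∨ E3 r = none)
    (hd23 : ∀ r ∈ l, E2 r = none ∨ E3 r = none) :
    (l.filterMap E).Perm (l.filterMap E1 ++ l.filterMap E2 ++ l.filterMap E3) := by
  induction l with
  | nil => simp
  | cons x xs ih =>
    have iht := ih (fun r hr => hsplit r (List.mem_cons_of_mem _ hr))
      (fun r hr => hd12 r (List.mem_cons_of_mem _ hr))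
      (fun r hr => hd13 r (List.mem_cons_of_mem _ hr))
      (fun r hr => hd23 r (List.mem_cons_of_mem _ hr))
    have hs := hsplit x List.mem_cons_self
    cases h1 : E1 x with
    | some b =>
      have hE : E x = some b := by rw [hs, h1]; rfl
      simp only [List.filterMap_cons, hE, h1]
      rcases hd12 x List.mem_cons_self with h12 | h12
      · simp [h1] at h12
      · rcases hd13 x List.mem_cons_self with h13 | h13
        · simp [h1] at h13
        · simp only [h12, h13]
          exact iht.cons b
    | none =>
      cases h2 : E2 x with
      | some b =>
        have hE : E x = some b := by rw [hs, h1, h2]; rfl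
        rcases hd23 x List.mem_cons_self with h23 | h23
        · simp [h2] at h23
        · simp only [List.filterMap_cons, hE, h1, h2, h23]
          refine (iht.cons b).trans ?_
          have e1 : xs.filterMap E1 ++ (b :: xs.filterMap E2) ++ xs.filterMap E3
              = xs.filterMap E1 ++ b :: (xs.filterMap E2 ++ xs.filterMap E3) := by simp
          have e2 : xs.filterMap E1 ++ xs.filterMap E2 ++ xs.filterMap E3
              = xs.filterMap E1 ++ (xs.filterMap E2 ++ xs.filterMap E3) := by simp
          rw [e1, e2]
          exact List.perm_middle.symm
      | none =>
        cases h3 : E3 x with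
        | some b =>
          have hE : E x = some b := by rw [hs, h1, h2, h3]; rfl
          simp only [List.filterMap_cons, hE, h1, h2, h3]
          refine (iht.cons b).trans ?_
          exact List.perm_middle.symm
        | none =>
          have hE : E x = none := by rw [hs, h1, h2, h3]; rfl
          simp only [List.filterMap_cons, hE, h1, h2, h3]
          exact iht

-- a sorted order is determined by the multiset together with the per-key subsequences
lemma pv_sorted_unique {α κ : Type} [LinearOrder κ] [DecidableEq κ] (key : α → κ) :
    ∀ (l1 l2 : List α), l1.Perm l2 → l1.Pairwise (fun a b => key a ≤ key b) →
      l2.Pairwise (fun a b => key a ≤ key b) →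
      (∀ k : κ, l1.filter (fun x => decide (key x = k))
        = l2.filter (fun x => decide (key x = k))) →
      l1 = l2 := by
  intro l1
  induction l1 with
  | nil =>
    intro l2 hperm _ _ _
    exact hperm.nil_eq
  | cons x t1 ih =>
    intro l2 hperm hp1 hp2 hf
    cases l2 with
    | nil => exact absurd hperm.symm.nil_eq (by simp)
    | cons y t2 =>
      obtain ⟨hx1, hp1t⟩ := List.pairwise_cons.mp hp1
      obtain ⟨hy1, hp2t⟩ := List.pairwise_cons.mp hp2
      have hkxy : key x = key y := by
        have hxy : key y ≤ key x := by
          have hx : x ∈ y :: t2 := hperm.subset List.mem_cons_self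
          rcases List.mem_cons.mp hx with rfl | hx
          · rfl
          · exact hy1 x hx
        have hyx : key x ≤ key y := by
          have hy : y ∈ x :: t1 := hperm.symm.subset List.mem_cons_self
          rcases List.mem_cons.mp hy with rfl | hy
          · rfl
          · exact hx1 y hy
        exact le_antisymm hyx hxy
      have hxy : x = y := by
        have h := hf (key x)
        rw [List.filter_cons_of_pos (by simp), List.filter_cons_of_pos (by simp [hkxy])] at h
        exact (List.cons.injEq .. ▸ h).1
      subst hxy
      have ht : t1 = t2 := by
        refine ih t2 hperm.cons_inv hp1t hp2t fun k => ?_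
        have h := hf k
        by_cases hk : key x = k
        · rw [List.filter_cons_of_pos (by simp [hk]),
            List.filter_cons_of_pos (by simp [hk])] at h
          exact (List.cons.injEq .. ▸ h).2
        · rwa [List.filter_cons_of_neg (by simp [hk]),
            List.filter_cons_of_neg (by simp [hk])] at h
      rw [ht]

-- ===== VERDICT (by name: the statement is the Claim_ definition above) =====
theorem process_c_and_h_spec : Claim_equal_process_c_and_h := by
  intro c hdom hpre
  unfold Spec_process_c_and_h process_c_and_h process_c_and_h_alt
  simp only []
  set cm := pvBuildMap c with hcm
  set hd := pvHdrSet c with hhd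
  set zs := PySem.List.sorted c pvName true with hzs
  have hperm : zs.Perm c := PySem.List.sorted_perm c pvName true
  -- A's loop is the filterMap over the reverse-sorted list
  have houtA : (zs.foldl (pvStepA cm) ([], PySem.Set.empty)).1 = zs.filterMap (pvEmit cm hd) := by
    have h := pv_loopA cm hd zs PySem.Set.empty []
      (hzs ▸ PySem.List.sorted_pairwise_rev c pvName)
      (fun r hr => by
        rw [hcm, pv_contains_buildMap]
        exact List.mem_map_of_mem (hperm.subset hr))
      (fun r hr hh => by
        rw [PySem.Set.contains_iff, hhd, pvHdrSet, pv_mem_headers]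
        exact ⟨r, hperm.subset hr, hh, rfl⟩)
      (fun n hct => by simp [PySem.Set.contains, PySem.Set.empty] at hct)
      (fun n hV hmem => by
        exfalso
        apply hmem
        have h2 := (PySem.Set.contains_iff _ _).mp hV.2.1
        rw [hhd, pvHdrSet, PySem.Set.mem_ofList] at h2
        obtain ⟨r, hr, hrn⟩ := List.mem_map.mp h2
        rw [← hrn]
        exact List.mem_map_of_mem (hperm.mem_iff.mpr (List.mem_of_mem_filter hr)))
    simpa using h
  -- B's three stages, as filterMaps
  have hM : (c.filter (fun r => pvPM cm (pvName r))).map (fun r => pvMerged cm r (pvBase (pvName r)))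
      = c.filterMap (pvEM cm) := by
    rw [pv_filter_map_eq_filterMap]; rfl
  have hL : (c.filter (fun r => pvPL cm (pvName r))).map pvItems
      = c.filterMap (pvEL cm) := by
    rw [pv_filter_map_eq_filterMap]; rfl
  have hP : (c.filter (fun r => pvPP cm (pvName r))).map pvItems
      = c.filterMap (pvEP cm) := by
    rw [pv_filter_map_eq_filterMap]; rfl
  rw [houtA, hM, hL, hP]
  -- branch bookkeeping
  have hbr : ∀ r, pvEmit cm hd r =
      if pvPM cm (pvName r) then some (pvMerged cm r (pvBase (pvName r)))
      else if pvPL cm (pvName r) then some (pvItems r)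
      else if pvPP cm (pvName r) then some (pvItems r)
      else none := fun r => pv_emit_eq_branches c r
  have hsplit : ∀ r, pvEmit cm hd r
      = ((pvEM cm r).orElse fun _ => ((pvEL cm r).orElse fun _ => pvEP cm r)) := by
    intro r
    rw [hbr r]
    unfold pvEM pvEL pvEP
    by_cases h1 : pvPM cm (pvName r) = true <;>
      by_cases h2 : pvPL cm (pvName r) = true <;>
      by_cases h3 : pvPP cm (pvName r) = true <;> simp [h1, h2, h3]
  -- E_β refines pvEmit
  have hrefM : ∀ r, ∀ b, pvEM cm r = some b → pvEmit cm hd r = some b := by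
    intro r b h
    unfold pvEM at h
    by_cases h1 : pvPM cm (pvName r) = true
    · rw [hbr r, if_pos h1]; rw [if_pos h1] at h; exact h
    · rw [if_neg h1] at h; simp at h
  have hLM : ∀ r, pvPL cm (pvName r) = true → pvPM cm (pvName r) = false := by
    intro r h
    unfold pvPL at h; unfold pvPM
    rcases Bool.and_eq_true_iff.mp h with ⟨h1, h2⟩
    simp_all
  have hPM : ∀ r, pvPP cm (pvName r) = true →
      pvPM cm (pvName r) = false ∧ pvPL cm (pvName r) = false := by
    intro r h
    unfold pvPP at h; unfold pvPM pvPL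
    rcases Bool.and_eq_true_iff.mp h with ⟨h1, h2⟩
    simp_all
  have hrefL : ∀ r, ∀ b, pvEL cm r = some b → pvEmit cm hd r = some b := by
    intro r b h
    unfold pvEL at h
    by_cases h2 : pvPL cm (pvName r) = true
    · rw [hbr r, if_neg (by simp [hLM r h2]), if_pos h2]; rw [if_pos h2] at h; exact h
    · rw [if_neg h2] at h; simp at h
  have hrefP : ∀ r, ∀ b, pvEP cm r = some b → pvEmit cm hd r = some b := by
    intro r b h
    unfold pvEP at h
    by_cases h3 : pvPP cm (pvName r) = true
    · obtain ⟨hm, hl⟩ := hPM r h3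
      rw [hbr r, if_neg (by simp [hm]), if_neg (by simp [hl]), if_pos h3]
      rw [if_pos h3] at h; exact h
    · rw [if_neg h3] at h; simp at h
  have hd12 : ∀ r, pvEM cm r = none ∨ pvEL cm r = none := by
    intro r
    by_cases h2 : pvPL cm (pvName r) = true
    · left; unfold pvEM; simp [hLM r h2]
    · right; unfold pvEL; simp [h2]
  have hd13 : ∀ r, pvEM cm r = none ∨ pvEP cm r = none := by
    intro r
    by_cases h3 : pvPP cm (pvName r) = true
    · left; unfold pvEM; simp [(hPM r h3).1]
    · right; unfold pvEP; simp [h3]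
  have hd23 : ∀ r, pvEL cm r = none ∨ pvEP cm r = none := by
    intro r
    by_cases h3 : pvPP cm (pvName r) = true
    · left; unfold pvEL; simp [(hPM r h3).2]
    · right; unfold pvEP; simp [h3]
  -- the two pre-sort lists are permutations
  have hpermB : (c.filterMap (pvEmit cm hd)).Perm
      (c.filterMap (pvEM cm) ++ c.filterMap (pvEL cm) ++ c.filterMap (pvEP cm)) :=
    pv_perm_split _ _ _ _ c (fun r _ => hsplit r) (fun r _ => hd12 r)
      (fun r _ => hd13 r) (fun r _ => hd23 r)
  -- sorted lists with equal key classes are equal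
  refine pv_sorted_unique pvName _ _
    ((PySem.List.sorted_perm _ pvName false).trans
      (((hperm.filterMap _).trans hpermB).trans (PySem.List.sorted_perm _ pvName false).symm))
    (PySem.List.sorted_pairwise _ pvName) (PySem.List.sorted_pairwise _ pvName) fun k => ?_
  rw [pv_sorted_filter_class pvName _ k _ (fun x _ h => of_decide_eq_true h),
      pv_sorted_filter_class pvName _ k _ (fun x _ h => of_decide_eq_true h)]
  set q : List (String × String) → Bool := fun x => decide (pvName x = k) with hq
  -- step 1: A's reverse-sorted class equals the original-order class
  have hstep1 : (zs.filterMap (pvEmit cm hd)).filter q = (c.filterMap (pvEmit cm hd)).filter q := by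
    rw [pv_filter_filterMap, pv_filter_filterMap]
    congr 1
    by_cases hex : ∃ r0 ∈ c,
        ((pvEmit cm hd r0).map q).getD false = true
    · obtain ⟨r0, hr0, hq0⟩ := hex
      cases hE0 : pvEmit cm hd r0 with
      | none => rw [hE0] at hq0; simp at hq0
      | some a0 =>
        rw [hE0] at hq0
        refine hzs ▸ pv_sorted_filter_class_rev pvName _ (pvName r0) c fun r hr hqr => ?_
        cases hEr : pvEmit cm hd r with
        | none => rw [hEr] at hqr; simp at hqr
        | some a =>
          rw [hEr] at hqr
          have hka : pvName a = k := by simpa [hq] using hqr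
          have hk0 : pvName a0 = k := by simpa [hq] using hq0
          exact pv_emit_keyeq c a a0 r r0 hr hr0 hEr hE0 (by rw [hka, hk0])
    · have hz : zs.filter (fun r => ((pvEmit cm hd r).map q).getD false) = [] := by
        rw [List.filter_eq_nil_iff]
        intro r hr hqr
        exact hex ⟨r, hperm.subset hr, hqr⟩
      have hc2 : c.filter (fun r => ((pvEmit cm hd r).map q).getD false) = [] := by
        rw [List.filter_eq_nil_iff]
        intro r hr hqr
        exact hex ⟨r, hr, hqr⟩
      rw [hz, hc2]
  -- step 2: the original-order class equals B's three-segment class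
  have hstep2 : (c.filterMap (pvEmit cm hd)).filter q
      = (c.filterMap (pvEM cm) ++ c.filterMap (pvEL cm) ++ c.filterMap (pvEP cm)).filter q := by
    rw [List.filter_append, List.filter_append]
    by_cases hex : ∃ r0 ∈ c, ∃ b0, pvEmit cm hd r0 = some b0 ∧ q b0 = true
    · obtain ⟨r0, hr0, b0, hE0, hq0⟩ := hex
      -- all class hits share r0's input name, hence r0's branch
      have hsame : ∀ r ∈ c, ∀ b, pvEmit cm hd r = some b → q b = true →
          pvName r = pvName r0 := by
        intro r hr b hE hqb
        refine pv_emit_keyeq c b b0 r r0 hr hr0 hE hE0 ?_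
        have h1 : pvName b = k := by simpa [hq] using hqb
        have h2 : pvName b0 = k := by simpa [hq] using hq0
        rw [h1, h2]
      -- the three main-branch arguments, shared by the case analysis below
      have hmainM : pvPM cm (pvName r0) = true → pvPL cm (pvName r0) = false →
          pvPP cm (pvName r0) = false →
          (c.filterMap (pvEmit cm hd)).filter q
            = (c.filterMap (pvEM cm)).filter q ++ (c.filterMap (pvEL cm)).filter q
              ++ (c.filterMap (pvEP cm)).filter q := by
        intro hbM hbL hbP
        have hmain : (c.filterMap (pvEM cm)).filter q = (c.filterMap (pvEmit cm hd)).filter q := by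
          refine pv_filterMap_filter_congr (pvEmit cm hd) (pvEM cm) q c
            (fun r _ b h => hrefM r b h) (fun r hr b hE hqb => ?_)
          have hn := hsame r hr b hE hqb
          unfold pvEM
          rw [if_pos (by rw [hn]; exact hbM)]
          rw [hbr r, if_pos (by rw [hn]; exact hbM)] at hE
          exact hE
        have hl : (c.filterMap (pvEL cm)).filter q = [] := by
          refine pv_filter_filterMap_nil (pvEL cm) q c fun r hr b h => ?_
          by_contra hqb
          have hqb' : q b = true := by simpa using hqb
          have hn := hsame r hr b (hrefL r b h) hqb'
          unfold pvEL at h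
          rw [if_neg (by rw [hn, hbL]; exact Bool.false_ne_true)] at h
          simp at h
        have hp2 : (c.filterMap (pvEP cm)).filter q = [] := by
          refine pv_filter_filterMap_nil (pvEP cm) q c fun r hr b h => ?_
          by_contra hqb
          have hqb' : q b = true := by simpa using hqb
          have hn := hsame r hr b (hrefP r b h) hqb'
          unfold pvEP at h
          rw [if_neg (by rw [hn, hbP]; exact Bool.false_ne_true)] at h
          simp at h
        rw [hmain, hl, hp2]
        simp
      have hmainL : pvPM cm (pvName r0) = false → pvPL cm (pvName r0) = true →
          pvPP cm (pvName r0) = false →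
          (c.filterMap (pvEmit cm hd)).filter q
            = (c.filterMap (pvEM cm)).filter q ++ (c.filterMap (pvEL cm)).filter q
              ++ (c.filterMap (pvEP cm)).filter q := by
        intro hbM hbL hbP
        have hmain : (c.filterMap (pvEL cm)).filter q = (c.filterMap (pvEmit cm hd)).filter q := by
          refine pv_filterMap_filter_congr (pvEmit cm hd) (pvEL cm) q c
            (fun r _ b h => hrefL r b h) (fun r hr b hE hqb => ?_)
          have hn := hsame r hr b hE hqb
          unfold pvEL
          rw [if_pos (by rw [hn]; exact hbL)]
          rw [hbr r, if_neg (by rw [hn, hbM]; exact Bool.false_ne_true),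
            if_pos (by rw [hn]; exact hbL)] at hE
          exact hE
        have hm : (c.filterMap (pvEM cm)).filter q = [] := by
          refine pv_filter_filterMap_nil (pvEM cm) q c fun r hr b h => ?_
          by_contra hqb
          have hqb' : q b = true := by simpa using hqb
          have hn := hsame r hr b (hrefM r b h) hqb'
          unfold pvEM at h
          rw [if_neg (by rw [hn, hbM]; exact Bool.false_ne_true)] at h
          simp at h
        have hp2 : (c.filterMap (pvEP cm)).filter q = [] := by
          refine pv_filter_filterMap_nil (pvEP cm) q c fun r hr b h => ?_
          by_contra hqb
          have hqb' : q b = true := by simpa using hqb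
          have hn := hsame r hr b (hrefP r b h) hqb'
          unfold pvEP at h
          rw [if_neg (by rw [hn, hbP]; exact Bool.false_ne_true)] at h
          simp at h
        rw [hmain, hm, hp2]
        simp
      have hmainP : pvPM cm (pvName r0) = false → pvPL cm (pvName r0) = false →
          pvPP cm (pvName r0) = true →
          (c.filterMap (pvEmit cm hd)).filter q
            = (c.filterMap (pvEM cm)).filter q ++ (c.filterMap (pvEL cm)).filter q
              ++ (c.filterMap (pvEP cm)).filter q := by
        intro hbM hbL hbP
        have hmain : (c.filterMap (pvEP cm)).filter q = (c.filterMap (pvEmit cm hd)).filter q := by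
          refine pv_filterMap_filter_congr (pvEmit cm hd) (pvEP cm) q c
            (fun r _ b h => hrefP r b h) (fun r hr b hE hqb => ?_)
          have hn := hsame r hr b hE hqb
          unfold pvEP
          rw [if_pos (by rw [hn]; exact hbP)]
          rw [hbr r, if_neg (by rw [hn, hbM]; exact Bool.false_ne_true),
            if_neg (by rw [hn, hbL]; exact Bool.false_ne_true),
            if_pos (by rw [hn]; exact hbP)] at hE
          exact hE
        have hm : (c.filterMap (pvEM cm)).filter q = [] := by
          refine pv_filter_filterMap_nil (pvEM cm) q c fun r hr b h => ?_
          by_contra hqb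
          have hqb' : q b = true := by simpa using hqb
          have hn := hsame r hr b (hrefM r b h) hqb'
          unfold pvEM at h
          rw [if_neg (by rw [hn, hbM]; exact Bool.false_ne_true)] at h
          simp at h
        have hl : (c.filterMap (pvEL cm)).filter q = [] := by
          refine pv_filter_filterMap_nil (pvEL cm) q c fun r hr b h => ?_
          by_contra hqb
          have hqb' : q b = true := by simpa using hqb
          have hn := hsame r hr b (hrefL r b h) hqb'
          unfold pvEL at h
          rw [if_neg (by rw [hn, hbL]; exact Bool.false_ne_true)] at h
          simp at h
        rw [hmain, hm, hl]
        simp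
      rcases hbM : pvPM cm (pvName r0) with _ | _
      · rcases hbL : pvPL cm (pvName r0) with _ | _
        · rcases hbP : pvPP cm (pvName r0) with _ | _
          · -- no branch holds: r0 could not have been emitted
            exfalso
            rw [hbr r0, hbM, hbL, hbP] at hE0
            simp at hE0
          · exact hmainP hbM hbL hbP
        · rcases hbP : pvPP cm (pvName r0) with _ | _
          · exact hmainL hbM hbL hbP
          · exact absurd hbL (by simp [(hPM r0 hbP).2])
      · rcases hbL : pvPL cm (pvName r0) with _ | _
        · rcases hbP : pvPP cm (pvName r0) with _ | _
          · exact hmainM hbM hbL hbP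
          · exact absurd hbM (by simp [(hPM r0 hbP).1])
        · exact absurd hbM (by simp [hLM r0 hbL])
    · have hnil : ∀ (E' : List (String × String) → Option (List (String × String))),
          (∀ r ∈ c, ∀ b, E' r = some b → pvEmit cm hd r = some b) →
          (c.filterMap E').filter q = [] := by
        intro E' href
        refine pv_filter_filterMap_nil E' q c fun r hr b h => ?_
        by_contra hqb
        exact hex ⟨r, hr, b, href r hr b h, by simpa using hqb⟩
      rw [hnil (pvEmit cm hd) (fun r _ b h => h), hnil (pvEM cm) (fun r _ b h => hrefM r b h),
        hnil (pvEL cm) (fun r _ b h => hrefL r b h), hnil (pvEP cm) (fun r _ b h => hrefP r b h)]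
      simp
  rw [hstep1, hstep2]
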